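-- pv_equiv track=rewrite | github.com/dilaraisikli/System-that-provides-information-of-roads-in-California-and-Nevada | functionality2.py | nodes_non_in_line
-- ===== SOURCE A (Python) =====
-- def contained(list1, list2):
--     for el in list1:
--         if el in list2:
--             continue
--         else:
--             return False
--     return True
--
-- def nodes_non_in_line(paths, nodes):
--     ot=[]
--     for i in range(len(paths)):
--         for j in range(len(paths)):
--             if i!= j:
--                 if (paths[i][-1]== paths[j][0]) & (paths[i][0]!= paths[j][-1]):
--                     ot.append(paths[i][:-1]+paths[j])
--
--     new=[]
--     for path in ot:
--         if contained(nodes, path):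
--             new.append(path)
--     return new
-- ===== SOURCE B (Python) =====
-- def nodes_non_in_line(paths, nodes):
--     # Bucket paths by their first node, then join each path only with the
--     # paths in the bucket of its last node; containment is a set test.
--     keyed = [(p[0], (j, p)) for j, p in enumerate(paths) if p]
--     by_start = {}
--     for key, jp in keyed:
--         by_start.setdefault(key, []).append(jp)
--     need = set(nodes)
--     out = []
--     for i, p in enumerate(paths):
--         if not p:
--             continue
--         for j, q in by_start.get(p[-1], []):
--             if j != i and p[0] != q[-1]:
--                 joined = p[:-1] + q
--                 if need.issubset(joined):
--                     out.append(joined)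
--     return out
-- ===== Notes on version B (the rewrite author's own statement) =====
-- stated objective: alternative
-- what changed: Replaces the all-pairs index scan by a dict bucketing paths by start node (each path is joined only with the paths in the bucket of its last node) and replaces the per-path node-by-node containment scan with a precomputed set subset test, fused into one pass.
import Mathlib
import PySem

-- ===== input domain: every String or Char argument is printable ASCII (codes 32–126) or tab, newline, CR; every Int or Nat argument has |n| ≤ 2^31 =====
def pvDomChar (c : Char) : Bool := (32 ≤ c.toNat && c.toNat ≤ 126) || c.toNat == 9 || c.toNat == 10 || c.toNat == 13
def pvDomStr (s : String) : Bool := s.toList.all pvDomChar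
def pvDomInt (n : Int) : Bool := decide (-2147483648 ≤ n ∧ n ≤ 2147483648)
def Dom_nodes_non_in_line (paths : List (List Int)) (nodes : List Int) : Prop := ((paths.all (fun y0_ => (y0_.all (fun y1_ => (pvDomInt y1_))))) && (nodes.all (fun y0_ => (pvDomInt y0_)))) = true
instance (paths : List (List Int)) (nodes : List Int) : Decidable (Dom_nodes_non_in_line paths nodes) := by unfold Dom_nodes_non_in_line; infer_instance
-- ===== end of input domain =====

-- B buckets the paths by start node in a dict and tests node containment against a
-- precomputed set, instead of A's all-pairs index scan plus per-node list scans.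

-- ===== PORT A =====
def contained (list1 list2 : List Int) : Bool :=
  match list1 with
  | [] => true
  | el :: rest => if list2.contains el then contained rest list2 else false

def nodes_non_in_line (paths : List (List Int)) (nodes : List Int) : List (List Int) :=
  let ot := (PySem.List.pyRange 0 paths.length 1).foldl (fun ot i =>
    (PySem.List.pyRange 0 paths.length 1).foldl (fun ot j =>
      if i ≠ j then
        if (PySem.List.pyGetD (PySem.List.pyGetD paths i []) (-1) 0
              == PySem.List.pyGetD (PySem.List.pyGetD paths j []) 0 0)
           && (PySem.List.pyGetD (PySem.List.pyGetD paths i []) 0 0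
              != PySem.List.pyGetD (PySem.List.pyGetD paths j []) (-1) 0) then
          ot ++ [PySem.List.slice (PySem.List.pyGetD paths i []) none (some (-1))
                   ++ PySem.List.pyGetD paths j []]
        else ot
      else ot) ot) ([] : List (List Int))
  ot.foldl (fun new path => if contained nodes path then new ++ [path] else new) []

-- ===== PORT B =====
def nodes_non_in_line_alt (paths : List (List Int)) (nodes : List Int) : List (List Int) :=
  let keyed := ((PySem.List.enumerate paths).filter (fun jp => !jp.2.isEmpty)).map
      (fun jp => (PySem.List.pyGetD jp.2 0 0, jp))
  let byStart : PySem.Dict Int (List (Int × List Int)) :=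
    keyed.foldl (fun d kv => d.modify kv.1 [] (· ++ [kv.2])) PySem.Dict.empty
  let need := PySem.Set.ofList nodes
  (PySem.List.enumerate paths).foldl (fun out ip =>
    if ip.2.isEmpty then out
    else (byStart.getD (PySem.List.pyGetD ip.2 (-1) 0) []).foldl (fun out jq =>
      if jq.1 != ip.1 && (PySem.List.pyGetD ip.2 0 0 != PySem.List.pyGetD jq.2 (-1) 0) then
        let joined := PySem.List.slice ip.2 none (some (-1)) ++ jq.2
        if PySem.Set.issubset need joined then out ++ [joined] else out
      else out) out) []

-- ===== PRECONDITION & SPEC =====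
-- A indexes paths[i][-1]/paths[j][0] for every pair i ≠ j, so it raises IndexError as
-- soon as paths has ≥ 2 elements one of which is empty; Pre_ excludes exactly that.
def Pre_nodes_non_in_line (paths : List (List Int)) (nodes : List Int) : Prop :=
  paths.length ≤ 1 ∨ ∀ p ∈ paths, p ≠ []
instance (paths : List (List Int)) (nodes : List Int) : Decidable (Pre_nodes_non_in_line paths nodes) := by unfold Pre_nodes_non_in_line; infer_instance

def pvWitness_nodes_non_in_line : List (List Int) × List Int := ([[1, 2], [2, 3]], [1, 2, 3])

def Spec_nodes_non_in_line (paths : List (List Int)) (nodes : List Int) (out : List (List Int)) : Prop := out = nodes_non_in_line_alt paths nodes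
instance (paths : List (List Int)) (nodes : List Int) (out : List (List Int)) : Decidable (Spec_nodes_non_in_line paths nodes out) := by unfold Spec_nodes_non_in_line; infer_instance

-- ===== CLAIM =====
def Claim_equal_nodes_non_in_line : Prop := ∀ (paths : List (List Int)) (nodes : List Int), Dom_nodes_non_in_line paths nodes → Pre_nodes_non_in_line paths nodes → Spec_nodes_non_in_line paths nodes (nodes_non_in_line paths nodes)

-- ===== LEMMAS AND PROOFS =====

-- A's filter condition / join for the pair (i, j), and the B-side analogues.
def pA (paths : List (List Int)) (i j : Int) : Bool :=
  decide (i ≠ j) &&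
    ((PySem.List.pyGetD (PySem.List.pyGetD paths i []) (-1) 0
        == PySem.List.pyGetD (PySem.List.pyGetD paths j []) 0 0)
     && (PySem.List.pyGetD (PySem.List.pyGetD paths i []) 0 0
        != PySem.List.pyGetD (PySem.List.pyGetD paths j []) (-1) 0))

def jA (paths : List (List Int)) (i j : Int) : List Int :=
  PySem.List.slice (PySem.List.pyGetD paths i []) none (some (-1)) ++ PySem.List.pyGetD paths j []

def keyedOf (paths : List (List Int)) : List (Int × (Int × List Int)) :=
  ((PySem.List.enumerate paths).filter (fun jp => !jp.2.isEmpty)).map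
      (fun jp => (PySem.List.pyGetD jp.2 0 0, jp))

def bucket (paths : List (List Int)) (k : Int) : List (Int × List Int) :=
  ((keyedOf paths).filter (fun kv => kv.1 == k)).map (·.2)

def pB (nodes : List Int) (ip jq : Int × List Int) : Bool :=
  (jq.1 != ip.1 && (PySem.List.pyGetD ip.2 0 0 != PySem.List.pyGetD jq.2 (-1) 0)) &&
    PySem.Set.issubset (PySem.Set.ofList nodes) (PySem.List.slice ip.2 none (some (-1)) ++ jq.2)

def jB (ip jq : Int × List Int) : List Int :=
  PySem.List.slice ip.2 none (some (-1)) ++ jq.2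

theorem contained_iff (l1 l2 : List Int) : contained l1 l2 = true ↔ ∀ x ∈ l1, x ∈ l2 := by
  induction l1 with
  | nil => simp [contained]
  | cons x xs ih => by_cases h : l2.contains x <;> simp_all [contained]

theorem A_norm (paths : List (List Int)) (nodes : List Int) :
    nodes_non_in_line paths nodes =
      ((PySem.List.pyRange 0 paths.length 1).flatMap
        (fun i => ((PySem.List.pyRange 0 paths.length 1).filter (pA paths i)).map (jA paths i))).filter
        (fun path => contained nodes path) := by
  unfold nodes_non_in_line
  rw [PySem.List.foldl_congr_mem _ _
        (fun ot i => ot ++ ((PySem.List.pyRange 0 paths.length 1).filter (pA paths i)).map (jA paths i)) _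
        ?inner]
  · rw [PySem.List.foldl_append_eq_flatMap, List.nil_append,
        PySem.List.foldl_append_if_eq_filter, List.nil_append]
  case inner =>
    intro ot i _
    beta_reduce
    rw [← PySem.List.foldl_append_if (pA paths i) (jA paths i)]
    apply PySem.List.foldl_congr_mem
    intro acc j _
    by_cases h : i = j
    · simp [pA, h]
    · simp [pA, jA, h]

theorem B_norm (paths : List (List Int)) (nodes : List Int) :
    nodes_non_in_line_alt paths nodes =
      (PySem.List.enumerate paths).flatMap (fun ip =>
        if ip.2.isEmpty then []
        else ((bucket paths (PySem.List.pyGetD ip.2 (-1) 0)).filter (pB nodes ip)).map (jB ip)) := by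
  unfold nodes_non_in_line_alt
  rw [PySem.List.foldl_congr_mem _ _
        (fun out ip => out ++
          (if ip.2.isEmpty then []
           else ((bucket paths (PySem.List.pyGetD ip.2 (-1) 0)).filter (pB nodes ip)).map (jB ip))) _
        ?body]
  · rw [PySem.List.foldl_append_eq_flatMap, List.nil_append]
  case body =>
    intro out ip _
    beta_reduce
    by_cases he : ip.2.isEmpty
    · simp [he]
    · simp only [he, if_false, Bool.false_eq_true]
      have hb : (((((PySem.List.enumerate paths).filter (fun jp => !jp.2.isEmpty)).map
            (fun jp => (PySem.List.pyGetD jp.2 0 0, jp))).foldl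
              (fun d kv => d.modify kv.1 [] (· ++ [kv.2])) PySem.Dict.empty).getD
                (PySem.List.pyGetD ip.2 (-1) 0) []) =
          bucket paths (PySem.List.pyGetD ip.2 (-1) 0) := by
        rw [PySem.Dict.getD_foldl_modify_append]
        simp [bucket, keyedOf]
      rw [hb, ← PySem.List.foldl_append_if (pB nodes ip) (jB ip)]
      apply PySem.List.foldl_congr_mem
      intro acc jq _
      by_cases h1 : (jq.1 != ip.1 && (PySem.List.pyGetD ip.2 0 0 != PySem.List.pyGetD jq.2 (-1) 0)) = true
      · simp [pB, jB, h1]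
      · simp [pB, jB, h1]

theorem map_filter_congr {α β : Type} (l : List α) (p q : α → Bool) (f g : α → β)
    (hp : ∀ x ∈ l, p x = q x) (hf : ∀ x ∈ l, f x = g x) :
    (l.filter p).map f = (l.filter q).map g := by
  rw [List.filter_congr hp]
  exact List.map_congr_left (fun x hx => hf x (List.mem_of_mem_filter hx))

theorem main_eq (paths : List (List Int)) (nodes : List Int)
    (h : ∀ p ∈ paths, p ≠ []) :
    nodes_non_in_line paths nodes = nodes_non_in_line_alt paths nodes := by
  rw [A_norm, B_norm, PySem.List.enumerate_eq_map_pyRange paths [], List.flatMap_map,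
      List.filter_flatMap]
  apply List.flatMap_congr
  intro i hi
  have hib : 0 ≤ i ∧ i < (paths.length : Int) := PySem.List.mem_pyRange_one.mp hi
  have hpi : PySem.List.pyGetD paths i [] ∈ paths :=
    PySem.List.pyGetD_mem paths [] (by unfold PySem.Raise.InRange; omega)
  have hine : (PySem.List.pyGetD paths i []).isEmpty = false := by
    simp [List.isEmpty_iff]; exact h _ hpi
  simp only [hine, Bool.false_eq_true, if_false]
  rw [List.filter_map, List.filter_filter]
  unfold bucket keyedOf
  rw [PySem.List.enumerate_eq_map_pyRange paths []]
  simp only [List.filter_map, List.map_map, List.filter_filter]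
  apply map_filter_congr
  case hf =>
    intro j _
    rfl
  case hp =>
    intro j hj
    have hjb : 0 ≤ j ∧ j < (paths.length : Int) := PySem.List.mem_pyRange_one.mp hj
    have hpj : PySem.List.pyGetD paths j [] ∈ paths :=
      PySem.List.pyGetD_mem paths [] (by unfold PySem.Raise.InRange; omega)
    have hjne : (PySem.List.pyGetD paths j []).isEmpty = false := by
      simp [List.isEmpty_iff]; exact h _ hpj
    apply Bool.coe_iff_coe.mp
    simp [pA, pB, jA, jB, contained_iff, PySem.Set.issubset_iff, hjne,
      Function.comp]
    constructor
    · rintro ⟨hc, hij, heq, hne⟩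
      exact ⟨⟨⟨fun e => hij e.symm, hne⟩, hc⟩, heq.symm⟩
    · rintro ⟨⟨⟨hji, hne⟩, hc⟩, heq⟩
      exact ⟨hc, fun e => hji e.symm, heq.symm, hne⟩

-- ===== VERDICT =====
theorem nodes_non_in_line_spec : Claim_equal_nodes_non_in_line := by
  intro paths nodes _ hpre
  unfold Spec_nodes_non_in_line
  by_cases h : ∀ p ∈ paths, p ≠ []
  · exact main_eq paths nodes h
  · rcases hpre with hlen | hall
    · -- some member is empty and length ≤ 1, so paths = [[]]
      push_neg at h
      rcases h with ⟨p, hp, hpe⟩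
      match paths, hp with
      | [q], hq =>
        simp only [List.mem_singleton] at hq
        subst hq; subst hpe
        rfl
      | q :: r :: s, _ => simp at hlen
    · exact absurd hall h
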